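-- pv_equiv track=rewrite | github.com/mnshgl0110/hometools | hometools/hometools.py | cgwalk
-- ===== SOURCE A (Python) =====
-- def cgwalk(cg, n, ngen='r'):
--     """
--     Returns how many bases would be travelled in the non-focal genome after moving n bases in the focal (ngen) genome.
--     """
--     cnt = 0                   # Count in the focal genome
--     ocnt = 0                  # Count in the other genome
--     nset = {'M', 'D', 'N', '=', 'X'} if ngen == 'r' else {'M', 'I', '=', 'X'}
--     oset = {'M', 'I', '=', 'X'} if ngen == 'r' else {'M', 'D', 'N', '=', 'X'}
--     for c in cg:
--         if c[1] in {'H', 'P', 'S'}: continue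
--         if c[1] in nset:
--             if n <= cnt + c[0]:
--                 if c[1] in {'M', '=', 'X'}:
--                     return ocnt + (n - cnt)
--                 elif c[1] in {'I', 'D', 'S', 'N'}:
--                     return ocnt
--             else:
--                 cnt += c[0]
--         if c[1] in oset:
--             ocnt += c[0]
--     raise ValueError("n is larger than the number of bases covered by cigartuple")
-- ===== SOURCE B (Python) =====
-- def cgwalk(cg, n, ngen='r'):
--     """
--     Returns how many bases would be travelled in the non-focal genome after moving n bases in the focal (ngen) genome.
--     """
--     nset = {'M', 'D', 'N', '=', 'X'} if ngen == 'r' else {'M', 'I', '=', 'X'}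
--     oset = {'M', 'I', '=', 'X'} if ngen == 'r' else {'M', 'D', 'N', '=', 'X'}
--     ops = [c for c in cg if c[1] not in {'H', 'P', 'S'}]
--     # precompute, for every kept op, the (focal, other) totals accumulated BEFORE it
--     pres = []
--     cnt = ocnt = 0
--     for l, op in ops:
--         pres.append((cnt, ocnt))
--         if op in nset:
--             cnt += l
--         if op in oset:
--             ocnt += l
--     hit = next(((c, p) for c, p in zip(ops, pres)
--                 if c[1] in nset and n <= p[0] + c[0]), None)
--     if hit is None:
--         raise ValueError("n is larger than the number of bases covered by cigartuple")
--     (l, op), (f, o) = hit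
--     if op in {'M', '=', 'X'}:
--         return o + (n - f)
--     return o
-- ===== Notes on version B (the rewrite author's own statement) =====
-- stated objective: alternative
-- what changed: B replaces A's single stateful early-return walk by a filter-once pass, precomputed per-op (focal, other) prefix-sum pairs, and a single search over the zipped arrays for the first qualifying op.
import Mathlib
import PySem

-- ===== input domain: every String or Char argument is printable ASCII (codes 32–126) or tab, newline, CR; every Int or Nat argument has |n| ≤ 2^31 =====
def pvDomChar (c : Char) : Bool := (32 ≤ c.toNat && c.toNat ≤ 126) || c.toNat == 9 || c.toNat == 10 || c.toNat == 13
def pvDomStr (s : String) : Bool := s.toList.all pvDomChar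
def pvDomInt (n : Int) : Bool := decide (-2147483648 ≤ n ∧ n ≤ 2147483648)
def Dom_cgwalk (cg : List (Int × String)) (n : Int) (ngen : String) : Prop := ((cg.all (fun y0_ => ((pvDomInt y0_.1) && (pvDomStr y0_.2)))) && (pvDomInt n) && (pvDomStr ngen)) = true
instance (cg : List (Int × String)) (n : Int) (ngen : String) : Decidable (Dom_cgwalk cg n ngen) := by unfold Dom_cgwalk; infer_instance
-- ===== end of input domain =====

-- B replaces A's stateful early-return walk by: filter the CIGAR once, precompute per-op
-- (focal, other) prefix totals, then pick the first qualifying op by a single search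
-- over the zipped arrays (alternative decomposition, same O(n) cost).

-- ===== PORT A =====
-- literal port of A's for-loop: state (cnt, ocnt), early returns, skip of H/P/S;
-- the Python ValueError at loop exhaustion is the [] case (excluded by Pre_cgwalk)
def cgwalkLoop (n : Int) (nset oset : List String) (cg : List (Int × String)) (cnt ocnt : Int) : Int :=
  match cg with
  | [] => 0
  | c :: rest =>
    if ["H", "P", "S"].contains c.2 then cgwalkLoop n nset oset rest cnt ocnt
    else if nset.contains c.2 then
      if n ≤ cnt + c.1 then
        if ["M", "=", "X"].contains c.2 then ocnt + (n - cnt)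
        else if ["I", "D", "S", "N"].contains c.2 then ocnt
        else cgwalkLoop n nset oset rest cnt (if oset.contains c.2 then ocnt + c.1 else ocnt)
      else cgwalkLoop n nset oset rest (cnt + c.1) (if oset.contains c.2 then ocnt + c.1 else ocnt)
    else cgwalkLoop n nset oset rest cnt (if oset.contains c.2 then ocnt + c.1 else ocnt)

def cgwalk (cg : List (Int × String)) (n : Int) (ngen : String) : Int :=
  let nset := if ngen = "r" then ["M", "D", "N", "=", "X"] else ["M", "I", "=", "X"]
  let oset := if ngen = "r" then ["M", "I", "=", "X"] else ["M", "D", "N", "=", "X"]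
  cgwalkLoop n nset oset cg 0 0

-- ===== PORT B =====
-- port of Source B's prefix-building loop: for each kept op, the (focal, other) totals before it
def buildPres (nset oset : List String) (ops : List (Int × String)) (cnt ocnt : Int) : List (Int × Int) :=
  match ops with
  | [] => []
  | c :: rest =>
    (cnt, ocnt) :: buildPres nset oset rest
      (if nset.contains c.2 then cnt + c.1 else cnt)
      (if oset.contains c.2 then ocnt + c.1 else ocnt)

def cgwalk_alt (cg : List (Int × String)) (n : Int) (ngen : String) : Int :=
  let nset := if ngen = "r" then ["M", "D", "N", "=", "X"] else ["M", "I", "=", "X"]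
  let oset := if ngen = "r" then ["M", "I", "=", "X"] else ["M", "D", "N", "=", "X"]
  let ops := cg.filter (fun c => !(["H", "P", "S"].contains c.2))
  let pres := buildPres nset oset ops 0 0
  match (ops.zip pres).find? (fun cp => nset.contains cp.1.2 && decide (n ≤ cp.2.1 + cp.1.1)) with
  | some cp => if ["M", "=", "X"].contains cp.1.2 then cp.2.2 + (n - cp.2.1) else cp.2.2
  | none => 0  -- Source B raises ValueError here, like A; excluded by Pre_cgwalk

-- ===== PRECONDITION & SPEC =====
-- focal bases consumed by a list of ops: sum of the lengths of its nset ops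
def focalSum (nset : List String) (ops : List (Int × String)) : Int :=
  ((ops.filter (fun c => nset.contains c.2)).map Prod.fst).sum

-- Pre_ = exactly the inputs on which the Python A returns: some kept op c with tag in nset
-- satisfies n ≤ (focal bases before it) + c.1; otherwise both Pythons raise ValueError.
def Pre_cgwalk (cg : List (Int × String)) (n : Int) (ngen : String) : Prop :=
  let nset := if ngen = "r" then ["M", "D", "N", "=", "X"] else ["M", "I", "=", "X"]
  let ops := cg.filter (fun c => !(["H", "P", "S"].contains c.2))
  ∃ p ∈ ops.zipIdx, nset.contains p.1.2 = true ∧ n ≤ focalSum nset (ops.take p.2) + p.1.1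
instance (cg : List (Int × String)) (n : Int) (ngen : String) : Decidable (Pre_cgwalk cg n ngen) := by
  unfold Pre_cgwalk; infer_instance

def pvWitness_cgwalk : (List (Int × String)) × Int × String := ([(5, "M")], 3, "r")

def Spec_cgwalk (cg : List (Int × String)) (n : Int) (ngen : String) (out : Int) : Prop := out = cgwalk_alt cg n ngen
instance (cg : List (Int × String)) (n : Int) (ngen : String) (out : Int) : Decidable (Spec_cgwalk cg n ngen out) := by unfold Spec_cgwalk; infer_instance

-- ===== CLAIM (what is proved, stated in full; the proofs are below) =====
def Claim_equal_cgwalk : Prop := ∀ (cg : List (Int × String)) (n : Int) (ngen : String), Dom_cgwalk cg n ngen → Pre_cgwalk cg n ngen → Spec_cgwalk cg n ngen (cgwalk cg n ngen)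

-- ===== LEMMAS AND PROOFS =====

-- A's loop skipping H/P/S equals A's loop on the pre-filtered list
theorem cgwalkLoop_filter (n : Int) (nset oset : List String) (cg : List (Int × String))
    (cnt ocnt : Int) :
    cgwalkLoop n nset oset cg cnt ocnt
      = cgwalkLoop n nset oset (cg.filter (fun c => !(["H", "P", "S"].contains c.2))) cnt ocnt := by
  induction cg generalizing cnt ocnt with
  | nil => rfl
  | cons c rest ih =>
    by_cases h : c.2 = "H" ∨ c.2 = "P" ∨ c.2 = "S"
    · have hc : (["H", "P", "S"].contains c.2) = true := by
        simp only [List.contains_eq_mem, List.mem_cons, List.not_mem_nil, or_false,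
          decide_eq_true_eq]
        exact h
      rw [cgwalkLoop]
      simp only [List.filter_cons, hc, Bool.not_true, Bool.false_eq_true, if_false, if_true]
      exact ih _ _
    · have hc : (["H", "P", "S"].contains c.2) = false := by
        simp only [List.contains_eq_mem, List.mem_cons, List.not_mem_nil, or_false,
          decide_eq_false_iff_not]
        exact h
      have hcp : ¬ ((["H", "P", "S"].contains c.2) = true) := by rw [hc]; simp
      rw [List.filter_cons, if_pos (by rw [hc]; rfl : (!(["H", "P", "S"].contains c.2)) = true)]
      rw [cgwalkLoop, if_neg hcp]
      conv_rhs => rw [cgwalkLoop, if_neg hcp]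
      split_ifs <;> first | rfl | exact ih _ _

-- A's loop on an H/P/S-free list equals B's find? over the zipped prefix arrays
theorem cgwalkLoop_eq_find (n : Int) (nset oset : List String)
    (hsub : ∀ s, nset.contains s = true →
      (["M", "=", "X"].contains s = true ∨ ["I", "D", "S", "N"].contains s = true))
    (ops : List (Int × String)) (hops : ∀ c ∈ ops, (["H", "P", "S"].contains c.2) = false)
    (cnt ocnt : Int) :
    cgwalkLoop n nset oset ops cnt ocnt
      = match (ops.zip (buildPres nset oset ops cnt ocnt)).find?
            (fun cp => nset.contains cp.1.2 && decide (n ≤ cp.2.1 + cp.1.1)) with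
        | some cp => if ["M", "=", "X"].contains cp.1.2 then cp.2.2 + (n - cp.2.1) else cp.2.2
        | none => 0 := by
  induction ops generalizing cnt ocnt with
  | nil => rfl
  | cons c rest ih =>
    have hc : (["H", "P", "S"].contains c.2) = false := hops c (List.mem_cons_self ..)
    have hrest : ∀ d ∈ rest, (["H", "P", "S"].contains d.2) = false :=
      fun d hd => hops d (List.mem_cons_of_mem _ hd)
    rw [buildPres, List.zip_cons_cons]
    by_cases hn : nset.contains c.2 = true
    · by_cases hle : n ≤ cnt + c.1
      · rw [List.find?_cons_of_pos (by
          show (nset.contains c.2 && decide (n ≤ cnt + c.1)) = true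
          rw [hn]; simp [hle])]
        rw [cgwalkLoop, if_neg (by rw [hc]; simp), if_pos hn, if_pos hle]
        rcases hsub c.2 hn with hm | hi
        · rw [if_pos hm]
          exact (if_pos hm).symm
        · have hnm : ¬ (["M", "=", "X"].contains c.2 = true) := by
            revert hi
            simp only [List.contains_eq_mem, List.mem_cons, List.not_mem_nil, or_false,
              decide_eq_true_eq]
            rintro (h | h | h | h) <;> rw [h] <;> simp
          rw [if_neg hnm, if_pos hi]
          exact (if_neg hnm).symm
      · rw [List.find?_cons_of_neg (by
          show ¬ ((nset.contains c.2 && decide (n ≤ cnt + c.1)) = true)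
          simp [hle])]
        rw [cgwalkLoop, if_neg (by rw [hc]; simp), if_pos hn, if_neg hle]
        rw [hn]
        simp only [if_true]
        exact ih hrest _ _
    · have hn' : nset.contains c.2 = false := Bool.eq_false_iff.mpr hn
      rw [List.find?_cons_of_neg (by
        show ¬ ((nset.contains c.2 && decide (n ≤ cnt + c.1)) = true)
        rw [hn']; simp)]
      rw [cgwalkLoop, if_neg (by rw [hc]; simp), if_neg hn]
      rw [hn']
      simp only [Bool.false_eq_true, if_false]
      exact ih hrest _ _

-- ===== VERDICT (by name: the statement is the Claim_ definition above) =====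
theorem cgwalk_spec : Claim_equal_cgwalk := by
  intro cg n ngen _ _
  unfold Spec_cgwalk cgwalk cgwalk_alt
  rw [cgwalkLoop_filter]
  apply cgwalkLoop_eq_find
  · intro s hs
    by_cases h : ngen = "r" <;>
      simp only [h, if_true, if_false, List.contains_eq_mem, List.mem_cons, List.not_mem_nil,
        or_false, decide_eq_true_eq] at hs ⊢ <;> tauto
  · intro c hc
    have := List.of_mem_filter hc
    simpa using this
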